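-- pv_equiv track=rewrite | github.com/pypi-data/pypi-mirror-207 | packages/topology-digital-operations/topology_digital_operations-1.0.2-py3-none-any.whl/topology_digital_operations/digital_image.py | subdivision
-- ===== SOURCE A (Python) =====
-- import itertools
--
-- def subdivision(k, elements):
--     """
--     Method which finds k subdivision
--     of a digital image.
--
--     Parameters:
--         k: int.
--             Subdivision number.
--         elements: list of tuples.
--             Elements which are going
--             to be subdivided.
--
--     Returns:
--         subdivision_elements: List
--         of tuples.
--             Elements from subdivision.
--     """
--     subdivision_elements = []
--     for element in elements:
--         new_elements_gen = []
--         for sub_element in element: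
--             poss_sub_element = []
--             for n in range(k):
--                 poss_sub_element.append(k*sub_element+n)
--             new_elements_gen.append(poss_sub_element)
--         cp = itertools.product(*new_elements_gen)
--         for new_element in cp:
--             subdivision_elements.append(new_element)
--     return subdivision_elements
-- ===== SOURCE B (Python) =====
-- def subdivision(k, elements):
--     out = []
--     for element in elements:
--         d = len(element)
--         total = max(k, 0) ** d
--         for i in range(total):
--             rem = i
--             coords = []
--             for s in reversed(element):
--                 rem, dig = divmod(rem, k)
--                 coords.append(k * s + dig)
--             coords.reverse()
--             out.append(tuple(coords))
--     return out
-- ===== Notes on version B (the rewrite author's own statement) =====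
-- stated objective: alternative
-- what changed: Replaces itertools.product over precomputed candidate lists by closed-form rank decoding: for each element it computes total = max(k,0)**d and decodes each index i in range(total) into a tuple via repeated divmod by k (mixed-radix digits), never materialising candidate lists or intermediate partial tuples.
import Mathlib
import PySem

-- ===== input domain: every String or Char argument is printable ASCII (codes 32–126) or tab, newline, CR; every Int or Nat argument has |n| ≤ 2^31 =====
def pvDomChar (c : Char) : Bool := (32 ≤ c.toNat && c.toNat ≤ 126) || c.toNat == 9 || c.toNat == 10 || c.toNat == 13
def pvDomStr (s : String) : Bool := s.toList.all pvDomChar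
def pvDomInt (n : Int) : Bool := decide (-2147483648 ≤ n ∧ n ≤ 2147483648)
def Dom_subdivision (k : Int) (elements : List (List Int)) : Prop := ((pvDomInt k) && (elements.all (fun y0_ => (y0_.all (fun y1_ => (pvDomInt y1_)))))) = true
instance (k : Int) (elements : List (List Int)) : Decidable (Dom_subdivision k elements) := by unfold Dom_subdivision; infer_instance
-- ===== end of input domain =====

-- B replaces itertools.product over precomputed candidate lists by closed-form rank
-- decoding of each index i < max(k,0)^d via repeated divmod (alternative algorithm).

-- ===== PORT A =====
-- itertools.product over a list of candidate lists, in itertools' order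
-- (first list varies slowest, last varies fastest).
def pvProduct : List (List Int) → List (List Int)
  | [] => [[]]
  | l :: ls => l.flatMap (fun x => (pvProduct ls).map (fun t => x :: t))

def subdivision (k : Int) (elements : List (List Int)) : List (List Int) :=
  elements.foldl (fun subdivision_elements element =>
    let new_elements_gen :=
      element.foldl (fun gen sub_element =>
        gen ++ [(PySem.List.pyRange 0 k 1).foldl
                  (fun poss n => poss ++ [k * sub_element + n]) []]) []
    subdivision_elements ++ pvProduct new_elements_gen) []

-- ===== PORT B =====
-- decode index i: fold over reversed element, taking divmod(rem, k) per coordinate.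
def subdivision_alt (k : Int) (elements : List (List Int)) : List (List Int) :=
  elements.foldl (fun out element =>
    let total : Int := (max k 0) ^ element.length
    out ++ (PySem.List.pyRange 0 total 1).map (fun i =>
      let st := element.reverse.foldl
        (fun (st : Int × List Int) s =>
          (PySem.Int.floordiv st.1 k, st.2 ++ [k * s + PySem.Int.mod st.1 k]))
        (i, ([] : List Int))
      st.2.reverse)) []

-- ===== PRECONDITION & SPEC =====
def Spec_subdivision (k : Int) (elements : List (List Int)) (out : List (List Int)) : Prop := out = subdivision_alt k elements
instance (k : Int) (elements : List (List Int)) (out : List (List Int)) : Decidable (Spec_subdivision k elements out) := by unfold Spec_subdivision; infer_instance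

-- ===== CLAIM (what is proved, stated in full; the proofs are below) =====
def Claim_equal_subdivision : Prop := ∀ (k : Int) (elements : List (List Int)), Dom_subdivision k elements → Spec_subdivision k elements (subdivision k elements)

-- ===== LEMMAS AND PROOFS =====

-- closed-form digits: coordinate j of the decoding of rank i (most significant first)
def pvDec (k : Int) : List Int → Int → List Int
  | [], _ => []
  | s :: rest, i => (k * s + (i / k ^ rest.length) % k) :: pvDec k rest i

-- building a list by '++ [f x]' is mapping
theorem pv_foldl_append_map {α β : Type} (f : α → β) :
    ∀ (l : List α) (init : List β),
      l.foldl (fun acc x => acc ++ [f x]) init = init ++ l.map f := by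
  intro l
  induction l with
  | nil => simp
  | cons x xs ih => intro init; simp [List.foldl, ih]

-- B's divmod fold computes the closed-form digits
theorem pv_fold_eq_dec (k : Int) (hk : 0 < k) :
    ∀ (l : List Int) (i : Int) (acc : List Int), 0 ≤ i →
      l.reverse.foldl
        (fun (st : Int × List Int) s =>
          (PySem.Int.floordiv st.1 k, st.2 ++ [k * s + PySem.Int.mod st.1 k]))
        (i, acc)
      = (i / k ^ l.length, acc ++ (pvDec k l i).reverse) := by
  intro l
  induction l with
  | nil => intro i acc hi; simp [pvDec]
  | cons s rest ih =>
      intro i acc hi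
      simp only [List.reverse_cons, List.foldl_append, List.foldl_cons, List.foldl_nil]
      rw [ih i acc hi]
      have hpow : (0:Int) < k ^ rest.length := pow_pos hk _
      have h1 : PySem.Int.floordiv (i / k ^ rest.length) k = i / k ^ (rest.length + 1) := by
        rw [PySem.Int.floordiv_eq_ediv_of_pos hk, pow_succ,
          Int.ediv_ediv_of_nonneg hpow.le]
      have h2 : PySem.Int.mod (i / k ^ rest.length) k = (i / k ^ rest.length) % k :=
        PySem.Int.mod_eq_emod_of_pos hk
      simp [pvDec, h1, h2]

-- the digits depend only on the rank modulo k^d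
theorem pv_dec_period (k : Int) (hk : 0 < k) :
    ∀ (l : List Int) (q r : Int), pvDec k l (q * k ^ l.length + r) = pvDec k l r := by
  intro l
  induction l with
  | nil => intro q r; simp [pvDec]
  | cons s rest ih =>
      intro q r
      have hpow : (k ^ rest.length) ≠ 0 := (pow_pos hk _).ne'
      have hdig : (q * k ^ (rest.length + 1) + r) / k ^ rest.length
          = q * k + r / k ^ rest.length := by
        rw [pow_succ]
        rw [show q * (k ^ rest.length * k) + r = r + (q * k) * k ^ rest.length by ring]
        rw [Int.add_mul_ediv_right _ _ hpow]
        ring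
      have hrec : pvDec k rest (q * k ^ (rest.length + 1) + r) = pvDec k rest r := by
        have : q * k ^ (rest.length + 1) + r = (q * k) * k ^ rest.length + r := by
          rw [pow_succ]; ring
        rw [this, ih]
      simp only [pvDec, List.length_cons, hdig, hrec]
      congr 2
      rw [show q * k + r / k ^ rest.length = r / k ^ rest.length + q * k from by ring,
        Int.add_mul_emod_self_right ..]

-- splitting a Nat range into blocks
theorem pv_range_mul (t : Nat) :
    ∀ (m : Nat), List.range (m * t)
      = (List.range m).flatMap (fun q => (List.range t).map (fun r => q * t + r)) := by
  intro m
  induction m with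
  | zero => simp
  | succ m ih =>
      rw [Nat.succ_mul, List.range_add, ih, List.range_succ]
      simp [List.flatMap_append]

-- main lemma: decoding all ranks yields itertools.product of the rows (positive k)
theorem pv_dec_product (k : Int) (hk : 0 < k) :
    ∀ (l : List Int),
      (PySem.List.pyRange 0 (k ^ l.length) 1).map (pvDec k l)
        = pvProduct (l.map (fun s => PySem.List.pyRange (k * s) (k * s + k) 1)) := by
  intro l
  induction l with
  | nil => simp [PySem.List.pyRange_one, pvProduct, pvDec]
  | cons s rest ih =>
      have hpow : (0:Int) < k ^ rest.length := pow_pos hk _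
      have htn : ((k ^ rest.length).toNat : Int) = k ^ rest.length := Int.toNat_of_nonneg hpow.le
      have hkn : ((k.toNat : Int)) = k := Int.toNat_of_nonneg hk.le
      -- rewrite both pyRanges as maps over Nat ranges
      rw [List.map_cons, pvProduct, ← ih]
      rw [PySem.List.pyRange_one, PySem.List.pyRange_one, PySem.List.pyRange_one]
      have hlen : (k ^ (s :: rest).length - 0).toNat = k.toNat * (k ^ rest.length).toNat := by
        have : k ^ (s :: rest).length = k * k ^ rest.length := by
          rw [List.length_cons, pow_succ]; ring
        rw [this, Int.sub_zero]
        rw [Int.toNat_mul hk.le hpow.le]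
      rw [hlen, pv_range_mul]
      have hka : (k * s + k - (k * s)).toNat = k.toNat := by omega
      rw [hka]
      simp only [List.map_flatMap, List.map_map, List.flatMap_map]
      apply List.flatMap_congr
      intro q hq
      have hq' : (q : Int) < k := by
        have := List.mem_range.mp hq; omega
      simp only [Int.sub_zero]
      apply List.map_congr_left
      intro r hr
      have hr' : (r : Int) < k ^ rest.length := by
        have := List.mem_range.mp hr; omega
      simp only [Function.comp_apply]
      push_cast [htn]
      simp only [zero_add]
      simp only [pvDec]
      have hdig : ((q : Int) * k ^ rest.length + r) / k ^ rest.length = q := by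
        rw [add_comm, Int.add_mul_ediv_right _ _ hpow.ne',
          Int.ediv_eq_zero_of_lt (by positivity) hr', zero_add]
      have hdig2 : ((q:Int)) % k = q := Int.emod_eq_of_lt (by positivity) hq'
      have hper : pvDec k rest ((q : Int) * k ^ rest.length + r) = pvDec k rest r := by
        exact pv_dec_period k hk rest q r
      rw [hdig, hdig2, hper]

-- per-element agreement, all k
theorem pv_element_eq (k : Int) (element : List Int) :
    (PySem.List.pyRange 0 ((max k 0) ^ element.length) 1).map (fun i =>
        (element.reverse.foldl
          (fun (st : Int × List Int) s =>
            (PySem.Int.floordiv st.1 k, st.2 ++ [k * s + PySem.Int.mod st.1 k]))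
          (i, ([] : List Int))).2.reverse)
      = pvProduct (element.map
          (fun s => PySem.List.pyRange (k * s) (k * s + k) 1)) := by
  by_cases hk : 0 < k
  · have hm : max k 0 = k := by omega
    rw [hm, ← pv_dec_product k hk element]
    apply List.map_congr_left
    intro i hi
    have hi0 : 0 ≤ i := (PySem.List.mem_pyRange_one.mp hi).1
    rw [pv_fold_eq_dec k hk element i [] hi0]
    simp
  · have hm : max k 0 = 0 := by omega
    rw [hm]
    cases element with
    | nil => simp [PySem.List.pyRange_one, pvProduct]
    | cons s rest =>
        have hrow : PySem.List.pyRange (k * s) (k * s + k) 1 = [] := by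
          simp [PySem.List.pyRange_one]
          omega
        simp [pvProduct, hrow]

-- ===== VERDICT (by name: the statement is the Claim_ definition above) =====
theorem subdivision_spec : Claim_equal_subdivision := by
  intro k elements _
  unfold Spec_subdivision subdivision subdivision_alt
  congr 1
  funext acc element
  simp only [pv_element_eq, pv_foldl_append_map, List.nil_append]
  congr 2
  apply List.map_congr_left
  intro s _
  simp [PySem.List.pyRange_one, List.map_map, Function.comp]
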